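-- pv_equiv track=rewrite | github.com/IsseBisse/adventofcode | 2015/python/15/hungry_science.py | special_subset_sum
-- ===== SOURCE A (Python) =====
-- def special_subset_sum(numbers, target, num_terms, partial=[], partial_sum=0):
--     if partial_sum == target and len(partial) == num_terms:
--         yield partial
--
--     if partial_sum >= target or len(partial) > num_terms:
--         return
--
--     for i, n in enumerate(numbers):
--         remaining = numbers[i + 1:]
--         yield from special_subset_sum(remaining, target, num_terms, partial + [n], partial_sum + n)
-- ===== SOURCE B (Python) =====
-- def special_subset_sum(numbers, target, num_terms, partial=[], partial_sum=0):
--     # Explicit stack-based DFS replacing A's recursion; same yield order.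
--     stack = [(numbers, partial, partial_sum)]
--     while stack:
--         nums, part, s = stack.pop()
--         if s == target and len(part) == num_terms:
--             yield part
--         if s >= target or len(part) > num_terms:
--             continue
--         children = [(nums[i + 1:], part + [nums[i]], s + nums[i])
--                     for i in range(len(nums))]
--         stack.extend(reversed(children))
-- ===== Notes on version B (the rewrite author's own statement) =====
-- stated objective: alternative
-- what changed: Replaces the recursive generator with an explicit stack-based iterative DFS that pops frames (remaining numbers, partial, partial_sum) and pushes children in reverse order, reproducing A's exact preorder yield sequence.
import Mathlib
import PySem

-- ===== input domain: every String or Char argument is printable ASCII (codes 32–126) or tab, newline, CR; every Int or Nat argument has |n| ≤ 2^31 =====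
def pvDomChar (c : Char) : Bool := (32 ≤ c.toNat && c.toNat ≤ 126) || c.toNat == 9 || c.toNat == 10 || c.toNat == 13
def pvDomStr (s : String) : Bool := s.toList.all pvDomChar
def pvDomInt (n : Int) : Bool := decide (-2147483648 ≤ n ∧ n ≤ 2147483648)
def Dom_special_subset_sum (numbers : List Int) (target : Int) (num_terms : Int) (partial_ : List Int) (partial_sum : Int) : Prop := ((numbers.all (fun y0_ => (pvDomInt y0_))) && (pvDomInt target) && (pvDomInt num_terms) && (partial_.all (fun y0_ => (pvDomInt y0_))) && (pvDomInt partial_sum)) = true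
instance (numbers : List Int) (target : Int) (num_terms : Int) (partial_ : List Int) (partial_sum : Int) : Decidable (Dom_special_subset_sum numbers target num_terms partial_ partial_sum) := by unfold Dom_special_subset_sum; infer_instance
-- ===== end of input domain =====

-- B replaces A's recursive generator with an explicit stack-driven DFS (same yield order); objective: alternative.
-- Both ports return the full list of yielded values of their Python generator.

-- ===== PORT A =====
-- A's recursion; the for-loop over enumerate(numbers) with remaining = numbers[i+1:]
-- is the structural recursion ssLoop over the same suffixes.
mutual
def special_subset_sum (numbers : List Int) (target : Int) (num_terms : Int) (partial_ : List Int) (partial_sum : Int) : List (List Int) :=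
  (if partial_sum = target ∧ (partial_.length : Int) = num_terms then [partial_] else []) ++
  (if partial_sum ≥ target ∨ (partial_.length : Int) > num_terms then []
   else ssLoop numbers target num_terms partial_ partial_sum)
  termination_by (numbers.length, 1)
def ssLoop (numbers : List Int) (target : Int) (num_terms : Int) (partial_ : List Int) (partial_sum : Int) : List (List Int) :=
  match numbers with
  | [] => []
  | n :: rest =>
      special_subset_sum rest target num_terms (partial_ ++ [n]) (partial_sum + n) ++
      ssLoop rest target num_terms partial_ partial_sum
  termination_by (numbers.length, 0)
end

-- ===== PORT B =====
-- B's stack machine: a frame is (remaining numbers, partial, partial_sum); the list head is the stack top.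
def ssChildren (nums : List Int) (part : List Int) (s : Int) : List (List Int × List Int × Int) :=
  match nums with
  | [] => []
  | n :: rest => (rest, part ++ [n], s + n) :: ssChildren rest part s

def ssMeasure (stack : List (List Int × List Int × Int)) : Nat :=
  (stack.map (fun f => 2 ^ f.1.length)).sum

theorem ssMeasure_children (nums : List Int) (part : List Int) (s : Int) :
    ssMeasure (ssChildren nums part s) = 2 ^ nums.length - 1 := by
  induction nums generalizing part s with
  | nil => rfl
  | cons n rest ih =>
      simp only [ssChildren, ssMeasure, List.map_cons, List.sum_cons, List.length_cons]
      rw [show ((ssChildren rest part s).map (fun f => 2 ^ f.1.length)).sum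
            = ssMeasure (ssChildren rest part s) from rfl, ih]
      have h : 1 ≤ 2 ^ rest.length := Nat.one_le_two_pow
      omega

theorem ssMeasure_append (a b : List (List Int × List Int × Int)) :
    ssMeasure (a ++ b) = ssMeasure a + ssMeasure b := by
  simp [ssMeasure]

def ssRun (target : Int) (num_terms : Int) (stack : List (List Int × List Int × Int)) : List (List Int) :=
  match stack with
  | [] => []
  | (nums, part, s) :: rest =>
      (if s = target ∧ (part.length : Int) = num_terms then [part] else []) ++
      (if s ≥ target ∨ (part.length : Int) > num_terms then
        ssRun target num_terms rest
       else
        ssRun target num_terms (ssChildren nums part s ++ rest))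
termination_by ssMeasure stack
decreasing_by
  · simp only [ssMeasure, List.map_cons, List.sum_cons]
    have h : 1 ≤ 2 ^ nums.length := Nat.one_le_two_pow
    omega
  · rw [ssMeasure_append, ssMeasure_children]
    simp only [ssMeasure, List.map_cons, List.sum_cons]
    have h : 1 ≤ 2 ^ nums.length := Nat.one_le_two_pow
    omega

def special_subset_sum_alt (numbers : List Int) (target : Int) (num_terms : Int) (partial_ : List Int) (partial_sum : Int) : List (List Int) :=
  ssRun target num_terms [(numbers, partial_, partial_sum)]

-- ===== PRECONDITION & SPEC =====
def Spec_special_subset_sum (numbers : List Int) (target : Int) (num_terms : Int) (partial_ : List Int) (partial_sum : Int) (out : List (List Int)) : Prop := out = special_subset_sum_alt numbers target num_terms partial_ partial_sum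
instance (numbers : List Int) (target : Int) (num_terms : Int) (partial_ : List Int) (partial_sum : Int) (out : List (List Int)) : Decidable (Spec_special_subset_sum numbers target num_terms partial_ partial_sum out) := by unfold Spec_special_subset_sum; infer_instance

-- ===== CLAIM (what is proved, stated in full; the proofs are below) =====
def Claim_equal_special_subset_sum : Prop := ∀ (numbers : List Int) (target : Int) (num_terms : Int) (partial_ : List Int) (partial_sum : Int), Dom_special_subset_sum numbers target num_terms partial_ partial_sum → Spec_special_subset_sum numbers target num_terms partial_ partial_sum (special_subset_sum numbers target num_terms partial_ partial_sum)

-- ===== LEMMAS AND PROOFS =====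

-- The children's subtrees concatenated are exactly A's loop over the suffixes.
theorem ssChildren_flatten (target num_terms : Int) (nums : List Int) (part : List Int) (s : Int) :
    ((ssChildren nums part s).map
        (fun f => special_subset_sum f.1 target num_terms f.2.1 f.2.2)).flatten
      = ssLoop nums target num_terms part s := by
  induction nums generalizing part s with
  | nil => simp [ssChildren, ssLoop]
  | cons n rest ih =>
      rw [ssLoop]
      simp only [ssChildren, List.map_cons, List.flatten_cons]
      rw [ih]

-- Running a stack processes each frame's whole subtree (A's recursion), in order.
theorem ssRun_eq_flatten (target num_terms : Int) :
    ∀ (k : Nat) (stack : List (List Int × List Int × Int)), ssMeasure stack ≤ k →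
      ssRun target num_terms stack
        = (stack.map (fun f => special_subset_sum f.1 target num_terms f.2.1 f.2.2)).flatten := by
  intro k
  induction k with
  | zero =>
      intro stack h
      cases stack with
      | nil => simp [ssRun]
      | cons f rest =>
          exfalso
          obtain ⟨nums, part, s⟩ := f
          simp only [ssMeasure, List.map_cons, List.sum_cons] at h
          have : 1 ≤ 2 ^ nums.length := Nat.one_le_two_pow
          omega
  | succ k ih =>
      intro stack h
      cases stack with
      | nil => simp [ssRun]
      | cons f rest =>
          obtain ⟨nums, part, s⟩ := f
          have hm : ssMeasure ((nums, part, s) :: rest)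
              = 2 ^ nums.length + ssMeasure rest := by
            simp [ssMeasure]
          have hone : 1 ≤ 2 ^ nums.length := Nat.one_le_two_pow
          rw [ssRun]
          simp only [List.map_cons, List.flatten_cons]
          by_cases hp : s ≥ target ∨ (part.length : Int) > num_terms
          · rw [if_pos hp, ih rest (by omega)]
            conv_rhs => rw [special_subset_sum]
            rw [if_pos hp]
            simp
          · rw [if_neg hp]
            have hm2 : ssMeasure (ssChildren nums part s ++ rest) ≤ k := by
              rw [ssMeasure_append, ssMeasure_children]; omega
            rw [ih _ hm2]
            conv_rhs => rw [special_subset_sum]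
            rw [if_neg hp]
            simp only [List.map_append, List.flatten_append, List.append_assoc]
            rw [ssChildren_flatten target num_terms nums part s]

-- ===== VERDICT (by name: the statement is the Claim_ definition above) =====
theorem special_subset_sum_spec : Claim_equal_special_subset_sum := by
  intro numbers target num_terms partial_ partial_sum _
  unfold Spec_special_subset_sum special_subset_sum_alt
  rw [ssRun_eq_flatten target num_terms (ssMeasure [(numbers, partial_, partial_sum)]) _ le_rfl]
  simp
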